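-- pv_equiv track=rewrite | github.com/carlosplanchon/betterhtmlchunking | betterhtmlchunking/utils.py | wanted_xpath
-- ===== SOURCE A (Python) =====
-- def wanted_xpath(
--     xpath: str,
--     tag_list_to_filter_out: list[str]
--         ) -> bool:
--     """Check if a node should be kept based on its XPath.
--
--     The previous implementation relied on simple substring matching which
--     meant that filtering out ``"/head"`` would also remove nodes such as
--     ``"/header"``.  To avoid these partial matches we compare XPath segments
--     against the unwanted tags, ignoring positional indices and case.
--
--     Parameters
--     ----------
--     xpath:
--         The XPath of the node to evaluate.
--     tag_list_to_filter_out: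
--         Tags or paths to exclude.  Each entry may contain multiple segments
--         (e.g. ``"/html/head"``).
--     """
--
--     def _split(xpath_to_split: str) -> list[str]:
--         """Return a list of lowercase tag names without positional indices."""
--         return [
--             segment.split("[")[0].lower()
--             for segment in xpath_to_split.strip("/").split("/")
--             if segment
--         ]
--
--     xpath_segments = _split(xpath)
--
--     for tag in tag_list_to_filter_out:
--         tag_segments = _split(tag)
--         tag_len = len(tag_segments)
--         # Slide over the xpath segments to look for an exact sequence match
--         for i in range(len(xpath_segments) - tag_len + 1):
--             if xpath_segments[i : i + tag_len] == tag_segments: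
--                 return False
--
--     return True
-- ===== SOURCE B (Python) =====
-- def wanted_xpath(
--     xpath: str,
--     tag_list_to_filter_out: list[str]
--         ) -> bool:
--     """Check if a node should be kept based on its XPath.
--
--     Same segment-exact semantics as before, but instead of sliding a
--     window of segment lists we normalize each path to a '/'-delimited
--     string ("/a/b/") and use a single substring containment test.
--     """
--
--     def _split(xpath_to_split: str) -> list[str]:
--         return [
--             segment.split("[")[0].lower()
--             for segment in xpath_to_split.strip("/").split("/")
--             if segment
--         ]
--
--     def _norm(path: str) -> str:
--         return "/" + "".join(seg + "/" for seg in _split(path))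
--
--     xs = _norm(xpath)
--     for tag in tag_list_to_filter_out:
--         if _norm(tag) in xs:
--             return False
--     return True
-- ===== Notes on version B (the rewrite author's own statement) =====
-- stated objective: idiomatic
-- what changed: B normalizes each path once into a '/'-delimited lowercase string ('/a/b/') and replaces A's per-tag sliding-window slice comparison over segment lists with a single substring containment test per tag.
import Mathlib
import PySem

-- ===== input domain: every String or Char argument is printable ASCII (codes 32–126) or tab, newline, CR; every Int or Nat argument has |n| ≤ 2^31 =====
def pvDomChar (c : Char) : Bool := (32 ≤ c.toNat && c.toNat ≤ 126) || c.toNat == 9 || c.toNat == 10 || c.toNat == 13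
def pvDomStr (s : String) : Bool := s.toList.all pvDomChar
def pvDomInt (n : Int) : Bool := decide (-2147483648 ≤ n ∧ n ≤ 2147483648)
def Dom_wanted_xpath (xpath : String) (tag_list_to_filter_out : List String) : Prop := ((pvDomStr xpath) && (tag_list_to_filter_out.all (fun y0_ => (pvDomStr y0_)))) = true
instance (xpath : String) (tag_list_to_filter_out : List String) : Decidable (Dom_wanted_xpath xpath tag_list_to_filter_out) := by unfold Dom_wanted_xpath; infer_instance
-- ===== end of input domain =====

-- B replaces A's per-tag sliding-window comparison of segment lists by one substring
-- containment test on '/'-delimited normalized strings (objective: more idiomatic).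

-- ===== PORT A =====
-- `_split` helper, identical in both Pythons: lowercase segments without positional
-- indices.  Python's `segment.split("[")[0]` is `headD []`: `str.split` always returns
-- a non-empty list, so `[0]` is exactly its head (exact on all inputs).
def pvSegMap (seg : List Char) : List Char :=
  PySem.Chars.lower ((PySem.Chars.splitOn seg ['[']).headD [])

def pvSplit (s : List Char) : List (List Char) :=
  ((PySem.Chars.splitOn (PySem.Chars.stripChars s ['/']) ['/']).filter
      (fun seg => !seg.isEmpty)).map pvSegMap

def wanted_xpath (xpath : String) (tag_list_to_filter_out : List String) : Bool :=
  let xpath_segments := pvSplit xpath.toList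
  -- `for tag: for i in range(...): if slice == tag_segments: return False` / `return True`
  !(tag_list_to_filter_out.any (fun tag =>
    let tag_segments := pvSplit tag.toList
    let tag_len : Int := tag_segments.length
    (PySem.List.pyRange 0 ((xpath_segments.length : Int) - tag_len + 1) 1).any (fun i =>
      PySem.List.slice xpath_segments (some i) (some (i + tag_len)) == tag_segments)))

-- ===== PORT B =====
-- `"/" + "".join(seg + "/" for seg in _split(path))`
def pvNorm (s : List Char) : List Char :=
  '/' :: (pvSplit s).flatMap (fun seg => seg ++ ['/'])

def wanted_xpath_alt (xpath : String) (tag_list_to_filter_out : List String) : Bool :=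
  let xs := pvNorm xpath.toList
  -- `for tag: if _norm(tag) in xs: return False` / `return True`
  !(tag_list_to_filter_out.any (fun tag => PySem.Chars.isIn (pvNorm tag.toList) xs))

-- ===== PRECONDITION & SPEC =====
def Spec_wanted_xpath (xpath : String) (tag_list_to_filter_out : List String) (out : Bool) : Prop := out = wanted_xpath_alt xpath tag_list_to_filter_out
instance (xpath : String) (tag_list_to_filter_out : List String) (out : Bool) : Decidable (Spec_wanted_xpath xpath tag_list_to_filter_out out) := by unfold Spec_wanted_xpath; infer_instance

-- ===== CLAIM (what is proved, stated in full; the proofs are below) =====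
def Claim_equal_wanted_xpath : Prop := ∀ (xpath : String) (tag_list_to_filter_out : List String), Dom_wanted_xpath xpath tag_list_to_filter_out → Spec_wanted_xpath xpath tag_list_to_filter_out (wanted_xpath xpath tag_list_to_filter_out)

-- ===== LEMMAS AND PROOFS =====

-- proof-side name for the '/'-delimited encoding used by pvNorm
def pvET (l : List (List Char)) : List Char := l.flatMap (fun seg => seg ++ ['/'])

theorem pvNorm_eq (s : List Char) : pvNorm s = '/' :: pvET (pvSplit s) := rfl

theorem pv_go_chars (sep : List Char) (fuel : Nat) :
    ∀ (l cur : List Char) (acc : List (List Char)),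
      ∀ p ∈ PySem.Chars.splitOn.go sep fuel l cur acc,
        ∀ c ∈ p, c ∈ l ∨ c ∈ cur ∨ ∃ q ∈ acc, c ∈ q := by
  induction fuel with
  | zero =>
    intro l cur acc p hp c hc
    simp only [PySem.Chars.splitOn.go] at hp
    simp only [List.mem_reverse, List.mem_cons] at hp
    rcases hp with h | h
    · subst h; simp only [List.mem_append, List.mem_reverse] at hc
      tauto
    · exact Or.inr (Or.inr ⟨p, h, hc⟩)
  | succ fuel ih =>
    intro l cur acc p hp c hc
    cases l with
    | nil =>
      simp only [PySem.Chars.splitOn.go, List.mem_reverse, List.mem_cons] at hp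
      rcases hp with h | h
      · subst h; simp only [List.mem_reverse] at hc; tauto
      · exact Or.inr (Or.inr ⟨p, h, hc⟩)
    | cons a rest =>
      simp only [PySem.Chars.splitOn.go] at hp
      split at hp
      · rcases ih _ _ _ p hp c hc with h | h | ⟨q, hq, hcq⟩
        · exact Or.inl (List.mem_of_mem_drop h)
        · simp at h
        · simp only [List.mem_cons] at hq
          rcases hq with rfl | hq
          · simp only [List.mem_reverse] at hcq; tauto
          · exact Or.inr (Or.inr ⟨q, hq, hcq⟩)
      · rcases ih _ _ _ p hp c hc with h | h | h
        · exact Or.inl (List.mem_cons_of_mem _ h)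
        · simp only [List.mem_cons] at h
          rcases h with rfl | h
          · exact Or.inl (List.mem_cons_self)
          · tauto
        · tauto

theorem pv_go_slash (fuel : Nat) :
    ∀ (l cur : List Char) (acc : List (List Char)),
      l.length < fuel → '/' ∉ cur → (∀ p ∈ acc, '/' ∉ p) →
      ∀ p ∈ PySem.Chars.splitOn.go ['/'] fuel l cur acc, '/' ∉ p := by
  induction fuel with
  | zero => intro l cur acc h; omega
  | succ fuel ih =>
    intro l cur acc hlen hcur hacc p hp
    cases l with
    | nil =>
      simp only [PySem.Chars.splitOn.go, List.mem_reverse, List.mem_cons] at hp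
      rcases hp with rfl | h
      · simpa using hcur
      · exact hacc p h
    | cons a rest =>
      simp only [PySem.Chars.splitOn.go] at hp
      by_cases hpre : List.isPrefixOf ['/'] (a :: rest) = true
      · rw [if_pos hpre] at hp
        refine ih _ _ _ (by simp at hlen ⊢; omega) (by simp) ?_ p hp
        intro q hq
        simp only [List.mem_cons] at hq
        rcases hq with rfl | hq
        · simpa using hcur
        · exact hacc q hq
      · rw [if_neg hpre] at hp
        have ha : a ≠ '/' := by
          intro rfl_a
          apply hpre
          simp [List.isPrefixOf, rfl_a]
        refine ih _ _ _ (by simp at hlen ⊢; omega) ?_ hacc p hp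
        intro hc
        simp only [List.mem_cons] at hc
        rcases hc with h | h
        · exact ha h.symm
        · exact hcur h

theorem pv_splitOn_chars (s sep : List Char) :
    ∀ p ∈ PySem.Chars.splitOn s sep, ∀ c ∈ p, c ∈ s := by
  intro p hp c hc
  have := pv_go_chars sep (s.length + 1) s [] [] p (by simpa [PySem.Chars.splitOn] using hp) c hc
  simpa using this

theorem pv_lowerChar_slash (c : Char) (h : PySem.Chars.lowerChar c = '/') : c = '/' := by
  unfold PySem.Chars.lowerChar PySem.Chars.isupper at h
  split at h
  · next hup =>
    exfalso
    simp only [Bool.and_eq_true, decide_eq_true_eq] at hup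
    have h1' : 65 ≤ c.toNat := hup.1
    have h2' : c.toNat ≤ 90 := hup.2
    have hv : (Char.ofNat (c.toNat + 32)).toNat = c.toNat + 32 := by
      rw [Char.toNat_ofNat, if_pos (Or.inl (by omega))]
    rw [h] at hv
    have h47 : ('/' : Char).toNat = 47 := rfl
    omega
  · exact h

theorem pv_split_slash_free (s : List Char) : ∀ seg ∈ pvSplit s, '/' ∉ seg := by
  intro seg hseg hmem
  simp only [pvSplit, List.mem_map, List.mem_filter] at hseg
  obtain ⟨seg0, ⟨h0, -⟩, rfl⟩ := hseg
  have hsf : '/' ∉ seg0 := by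
    have := pv_go_slash ((PySem.Chars.stripChars s ['/']).length + 1)
      (PySem.Chars.stripChars s ['/']) [] [] (by omega) (by simp) (by simp) seg0
    exact this h0
  simp only [pvSegMap, PySem.Chars.lower, List.mem_map] at hmem
  obtain ⟨c0, hc0, hlc⟩ := hmem
  have : c0 = '/' := pv_lowerChar_slash c0 hlc
  subst this
  cases hsp : PySem.Chars.splitOn seg0 ['['] with
  | nil => rw [hsp] at hc0; simp at hc0
  | cons h t =>
    rw [hsp] at hc0
    simp only [List.headD_cons] at hc0
    exact hsf (pv_splitOn_chars seg0 ['['] h (by rw [hsp]; exact List.mem_cons_self) '/' hc0)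

theorem pv_inner_iff (xs ts : List (List Char)) :
    ((PySem.List.pyRange 0 ((xs.length : Int) - (ts.length : Int) + 1) 1).any (fun i =>
      PySem.List.slice xs (some i) (some (i + (ts.length : Int))) == ts)) = true ↔ ts <:+: xs := by
  rw [List.any_eq_true]
  constructor
  · rintro ⟨i, hi, heq⟩
    rw [PySem.List.mem_pyRange_one] at hi
    obtain ⟨h0, hlt⟩ := hi
    obtain ⟨j, rfl⟩ := Int.eq_ofNat_of_zero_le h0
    rw [beq_iff_eq] at heq
    have hcast : (j : Int) + (ts.length : Int) = ((j + ts.length : Nat) : Int) := by push_cast; ring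
    rw [hcast, PySem.List.slice_natCast] at heq
    have hk : j + ts.length - j = ts.length := by omega
    rw [hk] at heq
    exact List.infix_iff_prefix_suffix.mpr ⟨xs.drop j, heq ▸ List.take_prefix _ _, List.drop_suffix j xs⟩
  · rintro ⟨p, s, rfl⟩
    refine ⟨(p.length : Int), ?_, ?_⟩
    · rw [PySem.List.mem_pyRange_one]
      constructor
      · positivity
      · simp only [List.length_append]
        push_cast
        omega
    · rw [beq_iff_eq]
      have hcast : (p.length : Int) + (ts.length : Int) = ((p.length + ts.length : Nat) : Int) := by push_cast; ring
      rw [hcast, PySem.List.slice_natCast]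
      have hk : p.length + ts.length - p.length = ts.length := by omega
      rw [hk, List.append_assoc, List.drop_left, List.take_left]


theorem pv_suffix_append {α : Type} {l a b : List α} (h : l <:+ a ++ b) :
    l <:+ b ∨ ∃ w, w <:+ a ∧ l = w ++ b := by
  obtain ⟨v, hv⟩ := h
  rcases List.append_eq_append_iff.mp hv with ⟨a', ha, hl⟩ | ⟨c', hv', hb⟩
  · exact Or.inr ⟨a', ⟨v, ha.symm⟩, hl⟩
  · exact Or.inl ⟨c', hb.symm⟩

theorem pvET_cons (x : List Char) (xs : List (List Char)) :
    pvET (x :: xs) = x ++ '/' :: pvET xs := by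
  simp [pvET]

theorem pv_enc_of_infix {ts xs : List (List Char)} (h : ts <:+: xs) :
    ('/' :: pvET ts) <:+: ('/' :: pvET xs) := by
  obtain ⟨p, s, rfl⟩ := h
  induction p with
  | nil =>
    refine ⟨[], pvET s, ?_⟩
    simp [pvET]
  | cons a p' ih =>
    have : ('/' :: pvET ((p' ++ ts) ++ s)) <:+ ('/' :: pvET ((a :: p' ++ ts) ++ s)) := by
      rw [show (a :: p' ++ ts) ++ s = a :: ((p' ++ ts) ++ s) by simp, pvET_cons]
      exact ⟨'/' :: a, by simp⟩
    exact ih.trans this.isInfix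

theorem pv_seg_prefix : ∀ (t x r r' : List Char), '/' ∉ t → '/' ∉ x →
    ((t ++ '/' :: r) <+: (x ++ '/' :: r')) → t = x ∧ r <+: r' := by
  intro t
  induction t with
  | nil =>
    intro x r r' _ hx h
    cases x with
    | nil => simpa using h
    | cons d x' =>
      exfalso
      rw [List.nil_append, show (d :: x') ++ '/' :: r' = d :: (x' ++ '/' :: r') by simp,
        List.cons_prefix_cons] at h
      exact hx (h.1 ▸ List.mem_cons_self)
  | cons c t' ih =>
    intro x r r' ht hx h
    cases x with
    | nil =>
      exfalso
      rw [List.nil_append, show (c :: t') ++ '/' :: r = c :: (t' ++ '/' :: r) by simp,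
        List.cons_prefix_cons] at h
      exact ht (h.1 ▸ List.mem_cons_self)
    | cons d x' =>
      rw [show (c :: t') ++ '/' :: r = c :: (t' ++ '/' :: r) by simp,
        show (d :: x') ++ '/' :: r' = d :: (x' ++ '/' :: r') by simp,
        List.cons_prefix_cons] at h
      obtain ⟨rfl, h2⟩ := h
      obtain ⟨rfl, hr⟩ := ih x' r r' (fun hm => ht (List.mem_cons_of_mem _ hm))
        (fun hm => hx (List.mem_cons_of_mem _ hm)) h2
      exact ⟨rfl, hr⟩

theorem pv_enc_prefix : ∀ (ts xs : List (List Char)), (∀ s ∈ ts, '/' ∉ s) → (∀ s ∈ xs, '/' ∉ s) →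
    pvET ts <+: pvET xs → ts <+: xs := by
  intro ts
  induction ts with
  | nil => intro xs _ _ _; exact List.nil_prefix
  | cons t ts' ih =>
    intro xs ht hx h
    cases xs with
    | nil =>
      exfalso
      have := h.length_le
      simp [pvET] at this
    | cons x xs' =>
      rw [pvET_cons, pvET_cons] at h
      obtain ⟨rfl, h2⟩ := pv_seg_prefix t x _ _ (ht t List.mem_cons_self) (hx x List.mem_cons_self) h
      exact List.cons_prefix_cons.mpr ⟨rfl, ih xs' (fun s hs => ht s (List.mem_cons_of_mem _ hs))
        (fun s hs => hx s (List.mem_cons_of_mem _ hs)) h2⟩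

theorem pv_enc_suffix : ∀ (xs : List (List Char)), (∀ s ∈ xs, '/' ∉ s) →
    ∀ u : List Char, ('/' :: u) <:+ ('/' :: pvET xs) → ∃ ys, ys <:+ xs ∧ u = pvET ys := by
  intro xs
  induction xs with
  | nil =>
    intro _ u h
    have hl := h.length_le
    simp only [pvET, List.flatMap_nil, List.length_cons, List.length_nil] at hl
    have hu : u = [] := List.length_eq_zero_iff.mp (by omega)
    subst hu
    exact ⟨[], List.nil_suffix, rfl⟩
  | cons x xs' ih =>
    intro hx u h
    rw [pvET_cons, show ('/' : Char) :: (x ++ '/' :: pvET xs') = ('/' :: x) ++ ('/' :: pvET xs') by simp] at h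
    rcases pv_suffix_append h with h2 | ⟨w, hw, hweq⟩
    · obtain ⟨ys, hys, rfl⟩ := ih (fun s hs => hx s (List.mem_cons_of_mem _ hs)) u h2
      exact ⟨ys, hys.trans (List.suffix_cons _ _), rfl⟩
    · cases w with
      | nil =>
        simp only [List.nil_append] at hweq
        obtain ⟨rfl⟩ : u = pvET xs' := by injection hweq
        exact ⟨xs', List.suffix_cons _ _, rfl⟩
      | cons c w' =>
        have hc : c = '/' := by
          have := hweq
          injection this with h1 _
          exact h1.symm
        subst hc
        rcases hw with ⟨v, hv⟩
        cases v with
        | nil =>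
          simp only [List.nil_append] at hv
          have hwx : w' = x := by injection hv
          have hu : u = w' ++ '/' :: pvET xs' := by
            have h2 := congrArg List.tail hweq
            simpa using h2
          exact ⟨x :: xs', List.suffix_refl _, by rw [hu, hwx, pvET_cons]⟩
        | cons d v' =>
          exfalso
          have hsub : '/' :: w' <:+ x := by
            refine ⟨v', ?_⟩
            have h2 := congrArg List.tail hv
            simpa using h2
          exact hx x List.mem_cons_self (hsub.subset List.mem_cons_self)

theorem pv_enc_iff (ts xs : List (List Char)) (ht : ∀ s ∈ ts, '/' ∉ s) (hx : ∀ s ∈ xs, '/' ∉ s) :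
    ('/' :: pvET ts) <:+: ('/' :: pvET xs) ↔ ts <:+: xs := by
  constructor
  · intro h
    obtain ⟨t', hpre, hsuf⟩ := List.infix_iff_prefix_suffix.mp h
    cases t' with
    | nil => simp at hpre
    | cons c u =>
      have hc : c = '/' := ((List.cons_prefix_cons.mp hpre).1).symm
      subst hc
      obtain ⟨ys, hys, rfl⟩ := pv_enc_suffix xs hx u hsuf
      have h2 : pvET ts <+: pvET ys := (List.cons_prefix_cons.mp hpre).2
      have hysf : ∀ s ∈ ys, '/' ∉ s := fun s hs => hx s (hys.subset hs)
      exact List.infix_iff_prefix_suffix.mpr ⟨ys, pv_enc_prefix ts ys ht hysf h2, hys⟩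
  · exact pv_enc_of_infix

theorem pv_pred_eq (xpath tag : String) :
    ((PySem.List.pyRange 0 (((pvSplit xpath.toList).length : Int) - ((pvSplit tag.toList).length : Int) + 1) 1).any (fun i =>
        PySem.List.slice (pvSplit xpath.toList) (some i) (some (i + ((pvSplit tag.toList).length : Int))) == pvSplit tag.toList))
      = PySem.Chars.isIn (pvNorm tag.toList) (pvNorm xpath.toList) := by
  rw [Bool.eq_iff_iff, pv_inner_iff, pvNorm_eq, pvNorm_eq, PySem.Chars.isIn_iff_infix,
    pv_enc_iff _ _ (pv_split_slash_free _) (pv_split_slash_free _)]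

-- ===== VERDICT (by name: the statement is the Claim_ definition above) =====
theorem wanted_xpath_spec : Claim_equal_wanted_xpath := by
  intro xpath tags _
  unfold Spec_wanted_xpath wanted_xpath wanted_xpath_alt
  exact congrArg (fun b => !b) (congrArg tags.any (funext fun tag => pv_pred_eq xpath tag))
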